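-- pv_equiv track=rewrite | github.com/nandamajay/Audio_Kernel_Development_Workbench | app/routes/patchwise.py | _extract_patch_metadata
-- ===== SOURCE A (Python) =====
-- from typing import Any, Dict, List
--
-- def _extract_patch_files(patch_content: str) -> List[str]:
--     files: List[str] = []
--     for line in (patch_content or "").splitlines():
--         if line.startswith("+++ b/"):
--             files.append(line.replace("+++ b/", "", 1).strip())
--     return [item for item in files if item and item != "/dev/null"]
--
-- def _extract_patch_metadata(patch_content: str) -> Dict[str, str]:
--     subject = ""
--     author = ""
--     date = ""
--     for line in (patch_content or "").splitlines():
--         low = line.lower()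
--         if low.startswith("subject:") and not subject:
--             subject = line.split(":", 1)[1].strip()
--         elif low.startswith("from:") and not author:
--             author = line.split(":", 1)[1].strip()
--         elif low.startswith("date:") and not date:
--             date = line.split(":", 1)[1].strip()
--         if subject and author and date:
--             break
--     patch_files = _extract_patch_files(patch_content)
--     patch_filename = patch_files[0] if patch_files else "patch.diff"
--     if not subject:
--         subject = f"Patch touching {patch_filename}"
--     return {"subject": subject, "author": author or "Unknown", "date": date or "", "patch_filename": patch_filename}
-- ===== SOURCE B (Python) =====
-- from typing import Dict, List
--
-- def _extract_patch_files(patch_content: str) -> List[str]: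
--     files: List[str] = []
--     for line in (patch_content or "").splitlines():
--         if line.startswith("+++ b/"):
--             files.append(line.replace("+++ b/", "", 1).strip())
--     return [item for item in files if item and item != "/dev/null"]
--
-- def _first_field(lines: List[str], prefix: str) -> str:
--     for line in lines:
--         if line.lower().startswith(prefix):
--             val = line.split(":", 1)[1].strip()
--             if val:
--                 return val
--     return ""
--
-- def _extract_patch_metadata(patch_content: str) -> Dict[str, str]:
--     lines = (patch_content or "").splitlines()
--     subject = _first_field(lines, "subject:")
--     author = _first_field(lines, "from:")
--     date = _first_field(lines, "date:")
--     patch_files = _extract_patch_files(patch_content)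
--     patch_filename = patch_files[0] if patch_files else "patch.diff"
--     return {"subject": subject or f"Patch touching {patch_filename}",
--             "author": author or "Unknown",
--             "date": date or "",
--             "patch_filename": patch_filename}
-- ===== Notes on version B (the rewrite author's own statement) =====
-- stated objective: simpler
-- what changed: Replaced A's single fused loop with mutable (subject, author, date) state, an elif chain and an early break by a small helper _first_field that scans the lines for the first header line with a nonempty value, called three times independently.
import Mathlib
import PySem

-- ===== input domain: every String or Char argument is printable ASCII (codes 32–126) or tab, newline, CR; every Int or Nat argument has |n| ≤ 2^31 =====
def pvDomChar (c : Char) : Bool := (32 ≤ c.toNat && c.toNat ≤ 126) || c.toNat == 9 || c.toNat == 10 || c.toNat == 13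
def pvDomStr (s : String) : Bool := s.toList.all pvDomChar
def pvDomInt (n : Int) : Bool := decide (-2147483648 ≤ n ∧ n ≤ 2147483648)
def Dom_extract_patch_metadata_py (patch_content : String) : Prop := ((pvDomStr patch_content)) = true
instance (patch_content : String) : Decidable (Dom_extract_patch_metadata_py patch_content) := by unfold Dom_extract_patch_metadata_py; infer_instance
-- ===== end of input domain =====

-- B replaces A's fused state-machine loop (elif chain + early break) by three independent
-- first-nonempty-match scans through a small helper; objective: simpler. Not faster.

-- line.split(":", 1)[1].strip(); in both programs this is only evaluated on lines that
-- start (case-insensitively) with a prefix containing ':', so index 1 exists; the pyGetD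
-- default "" is unreachable there.
def pvAfterColon (line : String) : String :=
  PySem.Str.strip (PySem.List.pyGetD ((PySem.Str.splitMax? line ":" 1).getD []) 1 "")

-- _extract_patch_files (identical helper in Source A and Source B).
-- line.replace("+++ b/", "", 1) is only applied to lines starting with "+++ b/", where
-- Python's count-1 replace removes exactly that 6-char prefix; exact there.
def extract_patch_files_py (patch_content : String) : List String :=
  let files := (PySem.Str.splitlines patch_content).foldl
    (fun fs line =>
      if PySem.Str.startswith line "+++ b/" then
        fs ++ [PySem.Str.strip (String.ofList (line.toList.drop 6))]
      else fs) []
  files.filter (fun item => !(item == "") && !(item == "/dev/null"))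

-- ===== PORT A =====
-- A's for-loop with state (subject, author, date), elif chain and early break.
def pvLoopA : List String → String → String → String → String × String × String
  | [], subject, author, date => (subject, author, date)
  | line :: rest, subject, author, date =>
    let low := PySem.Str.lower line
    let st :=
      if PySem.Str.startswith low "subject:" && subject == "" then
        (pvAfterColon line, author, date)
      else if PySem.Str.startswith low "from:" && author == "" then
        (subject, pvAfterColon line, date)
      else if PySem.Str.startswith low "date:" && date == "" then
        (subject, author, pvAfterColon line)
      else (subject, author, date)
    if st.1 != "" && st.2.1 != "" && st.2.2 != "" then st
    else pvLoopA rest st.1 st.2.1 st.2.2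

def extract_patch_metadata_py (patch_content : String) : List (String × String) :=
  let st := pvLoopA (PySem.Str.splitlines patch_content) "" "" ""
  let patch_files := extract_patch_files_py patch_content
  let patch_filename := match patch_files with | f :: _ => f | [] => "patch.diff"
  let subject := if st.1 == "" then "Patch touching " ++ patch_filename else st.1
  [("subject", subject),
   ("author", if st.2.1 == "" then "Unknown" else st.2.1),
   ("date", if st.2.2 == "" then "" else st.2.2),
   ("patch_filename", patch_filename)]

-- ===== PORT B =====
-- _first_field: first line whose lowercase starts with the prefix and whose value is nonempty.
def pvFirstField : List String → String → String
  | [], _ => ""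
  | line :: rest, pre =>
    if PySem.Str.startswith (PySem.Str.lower line) pre then
      let val := pvAfterColon line
      if val != "" then val else pvFirstField rest pre
    else pvFirstField rest pre

def extract_patch_metadata_py_alt (patch_content : String) : List (String × String) :=
  let lines := PySem.Str.splitlines patch_content
  let subject := pvFirstField lines "subject:"
  let author := pvFirstField lines "from:"
  let date := pvFirstField lines "date:"
  let patch_files := extract_patch_files_py patch_content
  let patch_filename := match patch_files with | f :: _ => f | [] => "patch.diff"
  [("subject", if subject == "" then "Patch touching " ++ patch_filename else subject),
   ("author", if author == "" then "Unknown" else author),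
   ("date", if date == "" then "" else date),
   ("patch_filename", patch_filename)]

-- ===== PRECONDITION & SPEC =====
def Spec_extract_patch_metadata_py (patch_content : String) (out : List (String × String)) : Prop := out = extract_patch_metadata_py_alt patch_content
instance (patch_content : String) (out : List (String × String)) : Decidable (Spec_extract_patch_metadata_py patch_content out) := by unfold Spec_extract_patch_metadata_py; infer_instance

-- ===== CLAIM (what is proved, stated in full; the proofs are below) =====
def Claim_equal_extract_patch_metadata_py : Prop := ∀ (patch_content : String), Dom_extract_patch_metadata_py patch_content → Spec_extract_patch_metadata_py patch_content (extract_patch_metadata_py patch_content)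

-- ===== LEMMAS AND PROOFS =====

-- two nonempty prefixes with different first characters cannot both be prefixes of one list
lemma pv_excl {cs p q : List Char} {a b : Char} (hab : a ≠ b)
    (hp : PySem.Chars.startswith cs (a :: p) = true) :
    PySem.Chars.startswith cs (b :: q) = false := by
  rw [PySem.Chars.startswith_iff] at hp
  by_contra h
  rw [Bool.not_eq_false, PySem.Chars.startswith_iff] at h
  obtain ⟨t, rfl⟩ := hp
  rw [List.cons_append, List.cons_prefix_cons] at h
  exact hab h.1.symm

lemma pv_excl_str {x : String} {p q : String} {a b : Char} (hab : a ≠ b)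
    (hpl : p.toList = a :: p.toList.tail) (hql : q.toList = b :: q.toList.tail)
    (h : PySem.Str.startswith x p = true) :
    PySem.Str.startswith x q = false := by
  simp only [PySem.Str.startswith_eq] at *
  rw [hpl] at h; rw [hql]
  exact pv_excl hab h

-- A's fused loop computes, in each component, B's first-nonempty-match scan
lemma pvLoopA_eq (ls : List String) (s a d : String) :
    pvLoopA ls s a d =
      ((if s == "" then pvFirstField ls "subject:" else s),
       (if a == "" then pvFirstField ls "from:" else a),
       (if d == "" then pvFirstField ls "date:" else d)) := by
  induction ls generalizing s a d with
  | nil =>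
    simp [pvLoopA, pvFirstField]
  | cons l ls ih =>
    have hsf : PySem.Str.startswith (PySem.Str.lower l) "subject:" = true →
        PySem.Str.startswith (PySem.Str.lower l) "from:" = false :=
      pv_excl_str (by decide) rfl rfl
    have hsd : PySem.Str.startswith (PySem.Str.lower l) "subject:" = true →
        PySem.Str.startswith (PySem.Str.lower l) "date:" = false :=
      pv_excl_str (by decide) rfl rfl
    have hfs : PySem.Str.startswith (PySem.Str.lower l) "from:" = true →
        PySem.Str.startswith (PySem.Str.lower l) "subject:" = false :=
      pv_excl_str (by decide) rfl rfl
    have hfd : PySem.Str.startswith (PySem.Str.lower l) "from:" = true →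
        PySem.Str.startswith (PySem.Str.lower l) "date:" = false :=
      pv_excl_str (by decide) rfl rfl
    have hds : PySem.Str.startswith (PySem.Str.lower l) "date:" = true →
        PySem.Str.startswith (PySem.Str.lower l) "subject:" = false :=
      pv_excl_str (by decide) rfl rfl
    have hdf : PySem.Str.startswith (PySem.Str.lower l) "date:" = true →
        PySem.Str.startswith (PySem.Str.lower l) "from:" = false :=
      pv_excl_str (by decide) rfl rfl
    by_cases h1 : PySem.Str.startswith (PySem.Str.lower l) "subject:" = true <;>
    by_cases h2 : PySem.Str.startswith (PySem.Str.lower l) "from:" = true <;>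
    by_cases h3 : PySem.Str.startswith (PySem.Str.lower l) "date:" = true <;>
      simp_all [pvLoopA, pvFirstField] <;>
      by_cases hs : s = "" <;> by_cases ha : a = "" <;> by_cases hd : d = "" <;>
      by_cases hv : pvAfterColon l = "" <;>
      simp_all

-- ===== VERDICT (by name: the statement is the Claim_ definition above) =====
theorem extract_patch_metadata_py_spec : Claim_equal_extract_patch_metadata_py := by
  intro pc _
  unfold Spec_extract_patch_metadata_py extract_patch_metadata_py extract_patch_metadata_py_alt
  rw [pvLoopA_eq]
  simp
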